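-- pv_equiv track=rewrite | github.com/photographyadam-lang/tsm | tsm/writers/completed_writer.py | _find_last_phase_section
-- ===== SOURCE A (Python) =====
-- def _find_last_phase_section(
--     lines: list[str], phase_heading: str
-- ) -> tuple[int, int] | None:
--     """Find the last occurrence of a ``## <name>`` section in *lines*.
--
--     Returns ``(start_idx, end_idx)`` where *start_idx* is the line index
--     of the phase heading and *end_idx* is the exclusive end (the index of
--     the next ``## `` heading or ``len(lines)``).  Returns ``None`` if no
--     such heading is found.
--     """
--     last_start = -1
--     for i, line in enumerate(lines):
--         if line.strip() == phase_heading: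
--             last_start = i
--
--     if last_start == -1:
--         return None
--
--     end = len(lines)
--     for i in range(last_start + 1, len(lines)):
--         if lines[i].strip().startswith("## "):
--             end = i
--             break
--
--     return (last_start, end)
-- ===== SOURCE B (Python) =====
-- def _find_last_phase_section(
--     lines: list[str], phase_heading: str
-- ) -> tuple[int, int] | None:
--     """Single backward pass: the first match seen from the end is the last
--     occurrence, and next_heading already holds the nearest following '## '
--     heading (or len(lines))."""
--     n = len(lines)
--     next_heading = n
--     i = n - 1
--     for line in reversed(lines):
--         s = line.strip()
--         if s == phase_heading:
--             return (i, next_heading)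
--         if s.startswith("## "):
--             next_heading = i
--         i -= 1
--     return None
-- ===== Notes on version B (the rewrite author's own statement) =====
-- stated objective: simpler
-- what changed: Replaced A's two forward scans (full pass to find the last matching heading, then a second scan for the next '## ' heading) by a single backward pass that returns at the first match from the end while already carrying the nearest following heading index.
import Mathlib
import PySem

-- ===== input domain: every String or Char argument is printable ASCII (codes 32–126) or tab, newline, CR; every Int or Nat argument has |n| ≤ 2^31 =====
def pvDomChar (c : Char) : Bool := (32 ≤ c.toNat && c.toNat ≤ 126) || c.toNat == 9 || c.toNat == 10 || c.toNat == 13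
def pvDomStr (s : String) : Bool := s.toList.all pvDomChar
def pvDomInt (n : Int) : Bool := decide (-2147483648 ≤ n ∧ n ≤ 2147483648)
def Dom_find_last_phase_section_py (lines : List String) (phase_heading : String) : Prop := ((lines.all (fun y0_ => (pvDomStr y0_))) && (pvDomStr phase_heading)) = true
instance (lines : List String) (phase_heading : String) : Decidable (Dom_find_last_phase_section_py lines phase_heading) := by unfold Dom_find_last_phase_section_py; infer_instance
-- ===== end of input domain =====

-- B replaces A's two forward scans by one backward pass that stops at the first
-- match from the end, carrying the nearest following '## ' heading index (simpler).

-- ===== PORT A =====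
-- the enumerate loop computing last_start
def pvLastA (phase : String) : List String → Int → Int → Int
  | [], _, acc => acc
  | l :: rest, i, acc =>
      pvLastA phase rest (i + 1) (if PySem.Str.strip l == phase then i else acc)

-- the range loop with break computing end
def pvEndA (lines : List String) : List Int → Int → Int
  | [], dflt => dflt
  | i :: rest, dflt =>
      if PySem.Str.startswith (PySem.Str.strip (PySem.List.pyGetD lines i "")) "## " then i
      else pvEndA lines rest dflt

def find_last_phase_section_py (lines : List String) (phase_heading : String) : Option (Int × Int) :=
  let last_start := pvLastA phase_heading lines 0 (-1)
  if last_start = -1 then none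
  else
    let e := pvEndA lines (PySem.List.pyRange (last_start + 1) (PySem.List.len lines) 1)
      (PySem.List.len lines)
    some (last_start, e)

-- ===== PORT B =====
-- the single backward loop (early return at the first match from the end)
def pvGoB (phase : String) : List String → Int → Int → Option (Int × Int)
  | [], _, _ => none
  | l :: rest, i, nh =>
      let s := PySem.Str.strip l
      if s == phase then some (i, nh)
      else pvGoB phase rest (i - 1) (if PySem.Str.startswith s "## " then i else nh)

def find_last_phase_section_py_alt (lines : List String) (phase_heading : String) : Option (Int × Int) :=
  pvGoB phase_heading lines.reverse (PySem.List.len lines - 1) (PySem.List.len lines)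

-- ===== PRECONDITION & SPEC =====
def Spec_find_last_phase_section_py (lines : List String) (phase_heading : String) (out : Option (Int × Int)) : Prop := out = find_last_phase_section_py_alt lines phase_heading
instance (lines : List String) (phase_heading : String) (out : Option (Int × Int)) : Decidable (Spec_find_last_phase_section_py lines phase_heading out) := by unfold Spec_find_last_phase_section_py; infer_instance

-- ===== CLAIM (what is proved, stated in full; the proofs are below) =====
def Claim_equal_find_last_phase_section_py : Prop := ∀ (lines : List String) (phase_heading : String), Dom_find_last_phase_section_py lines phase_heading → Spec_find_last_phase_section_py lines phase_heading (find_last_phase_section_py lines phase_heading)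

-- ===== LEMMAS AND PROOFS =====

-- first index in a list satisfying p
def pvFirstIdx (p : String → Bool) : List String → Option Nat
  | [] => none
  | l :: rest => if p l then some 0 else (pvFirstIdx p rest).map (· + 1)

-- last index in a list satisfying p
def pvLastIdx (p : String → Bool) : List String → Option Nat
  | [] => none
  | l :: rest =>
      match pvLastIdx p rest with
      | some j => some (j + 1)
      | none => if p l then some 0 else none

def pvM (phase : String) (l : String) : Bool := PySem.Str.strip l == phase
def pvH (l : String) : Bool := PySem.Str.startswith (PySem.Str.strip l) "## "

-- value of B's next_heading accumulator after the first j steps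
def pvNhAcc : List String → Nat → Int → Int → Int
  | _, 0, _, nh => nh
  | [], _ + 1, _, nh => nh
  | l :: rest, j + 1, i, nh => pvNhAcc rest j (i - 1) (if pvH l then i else nh)

theorem pvFirstIdx_lt {p : String → Bool} : ∀ {ys : List String} {j : Nat},
    pvFirstIdx p ys = some j → j < ys.length := by
  intro ys
  induction ys with
  | nil => intro j h; simp [pvFirstIdx] at h
  | cons l rest ih =>
      intro j h
      simp only [pvFirstIdx] at h
      split_ifs at h with hp
      · simp_all; omega
      · rcases Option.map_eq_some_iff.mp h with ⟨k, hk, rfl⟩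
        have := ih hk; simp; omega

theorem pvLastIdx_lt {p : String → Bool} : ∀ {ys : List String} {j : Nat},
    pvLastIdx p ys = some j → j < ys.length := by
  intro ys
  induction ys with
  | nil => intro j h; simp [pvLastIdx] at h
  | cons l rest ih =>
      intro j h
      simp only [pvLastIdx] at h
      cases hr : pvLastIdx p rest with
      | some k => rw [hr] at h; cases h; have := ih hr; simp; omega
      | none =>
          rw [hr] at h
          split_ifs at h with hp
          simp_all
          omega

theorem pvFirstIdx_append_singleton (p : String → Bool) : ∀ (xs : List String) (l : String),
    pvFirstIdx p (xs ++ [l]) =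
      (match pvFirstIdx p xs with
       | some j => some j
       | none => if p l then some xs.length else none) := by
  intro xs l
  induction xs with
  | nil => simp [pvFirstIdx]
  | cons x rest ih =>
      simp only [List.cons_append, pvFirstIdx, ih]
      cases hr : pvFirstIdx p rest <;> split_ifs <;> simp [List.length_cons]

theorem pvLastIdx_reverse (p : String → Bool) : ∀ (xs : List String),
    pvLastIdx p xs = (pvFirstIdx p xs.reverse).map (fun j => xs.length - 1 - j) := by
  intro xs
  induction xs with
  | nil => simp [pvLastIdx, pvFirstIdx]
  | cons l rest ih =>
      simp only [List.reverse_cons, pvFirstIdx_append_singleton, pvLastIdx, ih]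
      cases hr : pvFirstIdx p rest.reverse with
      | some j =>
          have hj : j < rest.length := by
            have := pvFirstIdx_lt hr; simpa using this
          simp only [Option.map_some]
          simp [List.length_cons]; omega
      | none => split_ifs <;> simp [List.length_cons]

theorem pvLastA_char (phase : String) : ∀ (xs : List String) (i acc : Int),
    pvLastA phase xs i acc =
      (match pvLastIdx (pvM phase) xs with
       | none => acc
       | some j => i + j) := by
  intro xs
  induction xs with
  | nil => intro i acc; simp [pvLastA, pvLastIdx]
  | cons l rest ih =>
      intro i acc
      simp only [pvLastA, ih, pvLastIdx]
      cases hr : pvLastIdx (pvM phase) rest with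
      | some j => push_cast; ring_nf
      | none => simp only [pvM]; split_ifs <;> simp

theorem pvEndA_char (lines : List String) : ∀ (k s : Nat), s + k = lines.length →
    pvEndA lines (PySem.List.pyRange (s : Int) (PySem.List.len lines) 1) (PySem.List.len lines) =
      (match pvFirstIdx pvH (lines.drop s) with
       | some t => ((s + t : Nat) : Int)
       | none => PySem.List.len lines) := by
  intro k
  induction k with
  | zero =>
      intro s hs
      have h1 : PySem.List.pyRange (s : Int) (PySem.List.len lines) 1 = [] := by
        apply PySem.List.pyRange_one_eq_nil; simp [PySem.List.len_eq]; omega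
      have h2 : lines.drop s = [] := by apply List.drop_eq_nil_of_le; omega
      rw [h1, h2]
      simp [pvEndA, pvFirstIdx]
  | succ k ih =>
      intro s hs
      have hlt : s < lines.length := by omega
      have h1 : PySem.List.pyRange (s : Int) (PySem.List.len lines) 1 =
          (s : Int) :: PySem.List.pyRange ((s : Int) + 1) (PySem.List.len lines) 1 := by
        apply PySem.List.pyRange_one_cons; simp [PySem.List.len_eq]; omega
      have h2 : lines.drop s = lines[s] :: lines.drop (s + 1) :=
        List.drop_eq_getElem_cons hlt
      have h3 : PySem.List.pyGetD lines (s : Int) "" = lines[s] := by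
        rw [PySem.List.pyGetD_natCast, List.getD_eq_getElem?_getD, List.getElem?_eq_getElem hlt]
        rfl
      rw [h1, h2]
      simp only [pvEndA, h3, pvFirstIdx, pvH]
      by_cases hp : PySem.Str.startswith (PySem.Str.strip lines[s]) "## " = true
      · rw [if_pos hp, if_pos hp]
        simp
      · rw [if_neg hp, if_neg hp]
        have hcast : ((s : Int) + 1) = ((s + 1 : Nat) : Int) := by push_cast; ring
        rw [hcast, ih (s + 1) (by omega)]
        cases hr : pvFirstIdx pvH (lines.drop (s + 1)) with
        | some t => simp only [Option.map_some]; push_cast; ring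
        | none => simp

theorem pvGoB_char (phase : String) : ∀ (ys : List String) (i nh : Int),
    pvGoB phase ys i nh =
      (match pvFirstIdx (pvM phase) ys with
       | none => none
       | some j => some (i - j, pvNhAcc ys j i nh)) := by
  intro ys
  induction ys with
  | nil => intro i nh; simp [pvGoB, pvFirstIdx]
  | cons l rest ih =>
      intro i nh
      simp only [pvGoB, pvFirstIdx, pvM]
      by_cases hp : (PySem.Str.strip l == phase) = true
      · rw [if_pos hp, if_pos hp]
        simp [pvNhAcc]
      · rw [if_neg hp, if_neg hp, ih]
        cases hr : pvFirstIdx (pvM phase) rest with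
        | some j =>
            simp only [Option.map_some, pvNhAcc, pvH, Option.some.injEq, Prod.mk.injEq]
            exact ⟨by push_cast; ring, rfl⟩
        | none => simp

theorem pvNhAcc_take : ∀ (ys : List String) (j : Nat) (i nh : Int), j ≤ ys.length →
    pvNhAcc ys j i nh = pvNhAcc (ys.take j) j i nh := by
  intro ys
  induction ys with
  | nil => intro j i nh h; simp at h; simp [h]
  | cons l rest ih =>
      intro j i nh h
      cases j with
      | zero => simp [pvNhAcc]
      | succ j =>
          simp only [List.take_succ_cons, pvNhAcc]
          exact ih j _ _ (by simp at h; omega)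

theorem pvNhAcc_full : ∀ (ys : List String) (i nh : Int),
    pvNhAcc ys ys.length i nh =
      (match pvLastIdx pvH ys with
       | some t => i - t
       | none => nh) := by
  intro ys
  induction ys with
  | nil => intro i nh; simp [pvNhAcc, pvLastIdx]
  | cons l rest ih =>
      intro i nh
      simp only [List.length_cons, pvNhAcc, ih, pvLastIdx]
      cases hr : pvLastIdx pvH rest with
      | some t => push_cast; ring_nf
      | none => split_ifs <;> simp

theorem pvLastA_none (phase : String) (xs : List String) (i acc : Int)
    (h : pvLastIdx (pvM phase) xs = none) : pvLastA phase xs i acc = acc := by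
  simp [pvLastA_char, h]

theorem pvLastA_some (phase : String) (xs : List String) (i acc : Int) (j : Nat)
    (h : pvLastIdx (pvM phase) xs = some j) : pvLastA phase xs i acc = i + j := by
  simp [pvLastA_char, h]

theorem pvGoB_none (phase : String) (ys : List String) (i nh : Int)
    (h : pvFirstIdx (pvM phase) ys = none) : pvGoB phase ys i nh = none := by
  simp [pvGoB_char, h]

theorem pvGoB_some (phase : String) (ys : List String) (i nh : Int) (j : Nat)
    (h : pvFirstIdx (pvM phase) ys = some j) :
    pvGoB phase ys i nh = some (i - j, pvNhAcc ys j i nh) := by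
  simp [pvGoB_char, h]

-- ===== VERDICT (by name: the statement is the Claim_ definition above) =====
theorem find_last_phase_section_py_spec : Claim_equal_find_last_phase_section_py := by
  intro lines phase _
  unfold Spec_find_last_phase_section_py
  simp only [find_last_phase_section_py, find_last_phase_section_py_alt]
  cases hL : pvLastIdx (pvM phase) lines with
  | none =>
      have hF : pvFirstIdx (pvM phase) lines.reverse = none := by
        have := pvLastIdx_reverse (pvM phase) lines
        rw [hL] at this
        cases hF : pvFirstIdx (pvM phase) lines.reverse with
        | none => rfl
        | some j => rw [hF] at this; simp at this
      rw [pvLastA_none phase lines 0 (-1) hL, pvGoB_none phase lines.reverse _ _ hF]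
      simp
  | some j0 =>
      have hj0 : j0 < lines.length := pvLastIdx_lt hL
      -- recover the reverse-side first index
      obtain ⟨j, hj, hjeq⟩ : ∃ j, pvFirstIdx (pvM phase) lines.reverse = some j ∧
          j0 = lines.length - 1 - j := by
        have := pvLastIdx_reverse (pvM phase) lines
        rw [hL] at this
        cases hF : pvFirstIdx (pvM phase) lines.reverse with
        | none => rw [hF] at this; simp at this
        | some j => rw [hF] at this; simp at this; exact ⟨j, rfl, this⟩
      have hjlt : j < lines.length := by
        have := pvFirstIdx_lt hj; simpa using this
      rw [pvLastA_some phase lines 0 (-1) j0 hL, pvGoB_some phase lines.reverse _ _ j hj]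
      have hne : ((0 : Int) + (j0 : Int)) ≠ -1 := by omega
      rw [if_neg hne]
      -- the start indices agree
      have hstart : (0 : Int) + (j0 : Int) = (PySem.List.len lines - 1) - (j : Int) := by
        simp [PySem.List.len_eq]; omega
      -- the end values agree
      have htake : lines.reverse.take j = (lines.drop (j0 + 1)).reverse := by
        have h : j0 + 1 = lines.length - j := by omega
        rw [h, List.take_reverse]
      have hnh : pvNhAcc lines.reverse j (PySem.List.len lines - 1) (PySem.List.len lines) =
          pvEndA lines
            (PySem.List.pyRange ((0 : Int) + (j0 : Int) + 1) (PySem.List.len lines) 1)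
            (PySem.List.len lines) := by
        rw [pvNhAcc_take lines.reverse j _ _ (by simp; omega), htake]
        have hlen : j = ((lines.drop (j0 + 1)).reverse).length := by simp; omega
        rw [hlen, pvNhAcc_full]
        rw [pvLastIdx_reverse pvH, List.reverse_reverse]
        have hz : ((0 : Int) + (j0 : Int) + 1) = ((j0 + 1 : Nat) : Int) := by push_cast; ring
        rw [hz, pvEndA_char lines (lines.length - (j0 + 1)) (j0 + 1) (by omega)]
        cases hr : pvFirstIdx pvH (lines.drop (j0 + 1)) with
        | some t =>
            have ht : t < (lines.drop (j0 + 1)).length := pvFirstIdx_lt hr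
            simp at ht
            simp [PySem.List.len_eq]
            show (↑lines.length : ℤ) - 1 - ↑(lines.length - (j0 + 1) - 1 - t) = ↑j0 + 1 + ↑t
            omega
        | none => simp
      rw [← hnh, hstart]
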